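-- pv_equiv track=rewrite | github.com/loukasak/Market-Analysis | genetics.py | peak_perfs
-- ===== SOURCE A (Python) =====
-- def peak_perfs(gens, perfs):
--     gs, ps = [], []
--     best = 0
--     for i in range(len(gens)):
--         if perfs[i] >= best:
--             gs.append(gens[i])
--             ps.append(perfs[i])
--             best = perfs[i]
--     if gens[-1] not in gs:
--         gs.append(gens[-1])
--         ps.append(ps[-1])
--     return gs, ps
-- ===== SOURCE B (Python) =====
-- def peak_perfs(gens, perfs):
--     # Two-phase: precompute the threshold table (running max of perfs floored at 0),
--     # then select the peak points by a filter over the zipped lists; same tail rule.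
--     n = len(gens)
--     thresholds = []
--     cur = 0
--     for p in perfs[:n]:
--         thresholds.append(cur)
--         cur = max(cur, p)
--     pairs = [(g, p) for (g, p), t in zip(zip(gens, perfs), thresholds) if p >= t]
--     gs = [g for g, _ in pairs]
--     ps = [p for _, p in pairs]
--     if gens[-1] not in gs:
--         gs.append(gens[-1])
--         ps.append(ps[-1])
--     return gs, ps
-- ===== Notes on version B (the rewrite author's own statement) =====
-- stated objective: alternative
-- what changed: Replaces A's single stateful loop (mutable running best updated inside the selection loop) by a two-phase design: first a scan builds a threshold table (running max of perfs floored at 0), then the peaks are selected by a pure filter over the zipped lists; the tail rule is unchanged.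
import Mathlib
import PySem

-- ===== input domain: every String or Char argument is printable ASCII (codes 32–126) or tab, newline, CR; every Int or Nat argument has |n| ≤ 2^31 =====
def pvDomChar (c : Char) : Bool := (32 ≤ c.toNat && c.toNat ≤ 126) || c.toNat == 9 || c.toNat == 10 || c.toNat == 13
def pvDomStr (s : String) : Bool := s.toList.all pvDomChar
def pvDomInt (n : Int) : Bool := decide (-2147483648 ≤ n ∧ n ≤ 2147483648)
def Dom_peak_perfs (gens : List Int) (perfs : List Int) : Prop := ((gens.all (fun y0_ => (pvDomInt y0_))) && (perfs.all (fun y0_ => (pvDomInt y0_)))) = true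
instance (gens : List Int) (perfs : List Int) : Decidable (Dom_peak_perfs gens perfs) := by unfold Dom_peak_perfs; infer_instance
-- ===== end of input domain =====

-- B replaces A's single stateful selection loop by a two-phase design (threshold table, then a pure filter); equivalence of return values proved on Pre_.


-- ===== PORT A =====
-- literal transliteration of A: one loop over range(len(gens)) with state (gs, ps, best);
-- list reads use pyGetD with default 0 (Python raises IndexError there; such inputs are excluded by Pre_)
def peak_perfs (gens : List Int) (perfs : List Int) : List Int × List Int :=
  let st :=
    (PySem.List.pyRange 0 gens.length 1).foldl
      (fun (st : List Int × List Int × Int) i =>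
        if PySem.List.pyGetD perfs i 0 ≥ st.2.2 then
          (st.1 ++ [PySem.List.pyGetD gens i 0],
           st.2.1 ++ [PySem.List.pyGetD perfs i 0],
           PySem.List.pyGetD perfs i 0)
        else st)
      ([], [], 0)
  let gs := st.1
  let ps := st.2.1
  if PySem.List.pyGetD gens (-1) 0 ∈ gs then (gs, ps)
  else (gs ++ [PySem.List.pyGetD gens (-1) 0], ps ++ [PySem.List.pyGetD ps (-1) 0])

-- ===== PORT B =====
-- transliteration of Source B: phase 1 builds the threshold table (running max floored at 0),
-- phase 2 filters the zipped lists; perfs[:n] with n = len(gens) ≥ 0 is exactly List.take n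
def peak_perfs_alt (gens : List Int) (perfs : List Int) : List Int × List Int :=
  let n := gens.length
  let tc := (perfs.take n).foldl
      (fun (st : List Int × Int) p => (st.1 ++ [st.2], max st.2 p)) ([], 0)
  let thresholds := tc.1
  let pairs := ((gens.zip perfs).zip thresholds).filter (fun gpt => gpt.1.2 ≥ gpt.2)
  let gs := pairs.map (fun gpt => gpt.1.1)
  let ps := pairs.map (fun gpt => gpt.1.2)
  if PySem.List.pyGetD gens (-1) 0 ∈ gs then (gs, ps)
  else (gs ++ [PySem.List.pyGetD gens (-1) 0], ps ++ [PySem.List.pyGetD ps (-1) 0])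

-- ===== PRECONDITION & SPEC =====
-- Pre_ is exactly where Python A returns: A raises IndexError on empty gens, on perfs shorter
-- than gens, and (at ps[-1]) when no perfs value among the first len(gens) is nonnegative.
def Pre_peak_perfs (gens : List Int) (perfs : List Int) : Prop :=
  gens ≠ [] ∧ gens.length ≤ perfs.length ∧ ∃ x ∈ perfs.take gens.length, 0 ≤ x
instance (gens : List Int) (perfs : List Int) : Decidable (Pre_peak_perfs gens perfs) := by unfold Pre_peak_perfs; infer_instance
def pvWitness_peak_perfs : List Int × List Int := ([1, 2], [3, 1])

def Spec_peak_perfs (gens : List Int) (perfs : List Int) (out : List Int × List Int) : Prop := out = peak_perfs_alt gens perfs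
instance (gens : List Int) (perfs : List Int) (out : List Int × List Int) : Decidable (Spec_peak_perfs gens perfs out) := by unfold Spec_peak_perfs; infer_instance

-- ===== CLAIM (what is proved, stated in full; the proofs are below) =====
def Claim_equal_peak_perfs : Prop := ∀ (gens : List Int) (perfs : List Int), Dom_peak_perfs gens perfs → Pre_peak_perfs gens perfs → Spec_peak_perfs gens perfs (peak_perfs gens perfs)
-- ===== LEMMAS AND PROOFS =====

-- model of the selection: records of the running max (seeded with `best`), plus the final max
def selB (best : Int) : List (Int × Int) → List (Int × Int) × Int
  | [] => ([], best)
  | (g, p) :: r => if p ≥ best then ((g, p) :: (selB p r).1, (selB p r).2) else selB best r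

-- model of B's threshold table
def thrL (cur : Int) : List Int → List Int
  | [] => []
  | p :: r => cur :: thrL (max cur p) r

lemma loopA (l1 : List Int) : ∀ (l2 : List Int) (s : Nat) (gens perfs gs ps : List Int) (best : Int),
    gens.drop s = l1 → perfs.drop s = l2 → l1.length ≤ l2.length →
    (List.range' s l1.length).foldl
      (fun (st : List Int × List Int × Int) i =>
        if perfs.getD i 0 ≥ st.2.2 then
          (st.1 ++ [gens.getD i 0], st.2.1 ++ [perfs.getD i 0], perfs.getD i 0)
        else st)
      (gs, ps, best)
    = (gs ++ ((selB best (l1.zip l2)).1.map Prod.fst),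
       ps ++ ((selB best (l1.zip l2)).1.map Prod.snd),
       (selB best (l1.zip l2)).2) := by
  induction l1 with
  | nil => intro l2 s gens perfs gs ps best _ _ _; simp [selB]
  | cons g l1' ih =>
    intro l2 s gens perfs gs ps best hg hp hlen
    cases l2 with
    | nil => simp at hlen
    | cons p l2' =>
      have hgs : gens.getD s 0 = g := by
        have h : (List.drop s gens)[(0:Nat)]? = gens[s + 0]? := List.getElem?_drop
        rw [hg] at h
        simp only [Nat.add_zero] at h
        simp [List.getD, ← h]
      have hps : perfs.getD s 0 = p := by
        have h : (List.drop s perfs)[(0:Nat)]? = perfs[s + 0]? := List.getElem?_drop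
        rw [hp] at h
        simp only [Nat.add_zero] at h
        simp [List.getD, ← h]
      have hg' : gens.drop (s+1) = l1' := by
        have := congrArg (List.drop 1) hg
        simpa [List.drop_drop, Nat.add_comm] using this
      have hp' : perfs.drop (s+1) = l2' := by
        have := congrArg (List.drop 1) hp
        simpa [List.drop_drop, Nat.add_comm] using this
      simp only [List.length_cons]
      rw [List.range'_succ]
      simp only [List.foldl_cons, hgs, hps]
      by_cases hb : p ≥ best
      · rw [if_pos hb, ih l2' (s+1) gens perfs _ _ p hg' hp' (by simpa using hlen)]
        simp [selB, hb, List.append_assoc]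
      · rw [if_neg hb, ih l2' (s+1) gens perfs _ _ best hg' hp' (by simpa using hlen)]
        simp [selB, hb]

lemma thrFold (l2 : List Int) : ∀ (acc : List Int) (cur : Int),
    (l2.foldl (fun (st : List Int × Int) p => (st.1 ++ [st.2], max st.2 p)) (acc, cur)).1
      = acc ++ thrL cur l2 := by
  induction l2 with
  | nil => intro acc cur; simp [thrL]
  | cons p r ih => intro acc cur; simp [thrL, List.foldl_cons, ih, List.append_assoc]

lemma filterSel (l : List (Int × Int)) : ∀ (best : Int),
    ((l.zip (thrL best (l.map Prod.snd))).filter (fun gpt => gpt.1.2 ≥ gpt.2)).map Prod.fst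
      = (selB best l).1 := by
  induction l with
  | nil => intro best; simp [thrL, selB]
  | cons gp r ih =>
    intro best
    obtain ⟨g, p⟩ := gp
    by_cases hb : p ≥ best
    · simp [thrL, selB, hb, ih p]
    · have hmax : max best p = best := max_eq_left (le_of_not_ge hb)
      simp [thrL, selB, hb, hmax, ih best]

lemma map_snd_zip_len (a : List Int) : ∀ (b : List Int), a.length ≤ b.length →
    (a.zip b).map Prod.snd = b.take a.length := by
  induction a with
  | nil => intro b _; simp
  | cons x a' ih =>
    intro b hlen
    cases b with
    | nil => simp at hlen
    | cons y b' => simp [List.zip_cons_cons, ih b' (by simpa using hlen)]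

-- ===== VERDICT (by name: the statement is the Claim_ definition above) =====
theorem peak_perfs_spec : Claim_equal_peak_perfs := by
  intro gens perfs _ hpre
  obtain ⟨hne, hle, -⟩ := hpre
  have hA : (PySem.List.pyRange 0 gens.length 1).foldl
      (fun (st : List Int × List Int × Int) i =>
        if PySem.List.pyGetD perfs i 0 ≥ st.2.2 then
          (st.1 ++ [PySem.List.pyGetD gens i 0],
           st.2.1 ++ [PySem.List.pyGetD perfs i 0],
           PySem.List.pyGetD perfs i 0)
        else st) ([], [], 0)
      = ((selB 0 (gens.zip perfs)).1.map Prod.fst,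
         (selB 0 (gens.zip perfs)).1.map Prod.snd,
         (selB 0 (gens.zip perfs)).2) := by
    rw [PySem.List.pyRange_one, List.foldl_map]
    simp only [zero_add, PySem.List.pyGetD_natCast]
    have ht : (((gens.length : Int)) - 0).toNat = gens.length := by simp
    rw [ht, List.range_eq_range']
    simpa using loopA gens perfs 0 gens perfs [] [] 0 (by simp) (by simp) hle
  have hthr : ((perfs.take gens.length).foldl
      (fun (st : List Int × Int) p => (st.1 ++ [st.2], max st.2 p)) ([], 0)).1
      = thrL 0 (perfs.take gens.length) := by
    simpa using thrFold (perfs.take gens.length) [] 0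
  have hsnd := map_snd_zip_len gens perfs hle
  have hfil := filterSel (gens.zip perfs) 0
  unfold Spec_peak_perfs peak_perfs peak_perfs_alt
  simp only [hA, hthr]
  rw [← hsnd]
  rw [show (fun (gpt : (Int × Int) × Int) => gpt.1.1) = Prod.fst ∘ Prod.fst from rfl,
      show (fun (gpt : (Int × Int) × Int) => gpt.1.2) = Prod.snd ∘ Prod.fst from rfl,
      ← List.map_map, ← List.map_map, hfil]
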